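-- pv_equiv track=rewrite | github.com/sshhaauuooii/DEEIP | models/utils/evaluate.py | agg_ins_event_role_tpfpfn_stats
-- ===== SOURCE A (Python) =====
-- def agg_ins_event_role_tpfpfn_stats(pred_record_mat, gold_record_mat, event_role_num_list):
--     """
--     Aggregate TP,FP,FN statistics for a single instance.
--     A record_mat should be formated as
--     [(Event Index)
--         [(Record Index)
--             ((Role Index)
--                 argument 1, ...
--             ), ...
--         ], ...
--     ], where argument 1 should support the '=' operation and the empty argument is None.
--     """
--     assert len(pred_record_mat) == len(gold_record_mat)
--     # tpfpfn_stat: TP, FP, FN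
--     event_role_tpfpfn_stats = []
--     for event_idx, (pred_records, gold_records) in enumerate(zip(pred_record_mat, gold_record_mat)):
--         role_num = event_role_num_list[event_idx]
--         role_tpfpfn_stats = agg_event_role_tpfpfn_stats(pred_records, gold_records, role_num)
--         event_role_tpfpfn_stats.append(role_tpfpfn_stats)
--
--     return event_role_tpfpfn_stats
--
-- def agg_event_role_tpfpfn_stats(pred_records, gold_records, role_num):
--     """
--     Aggregate TP,FP,FN statistics for a single event prediction of one instance.
--     A pred_records should be formated as
--     [(Record Index)
--         ((Role Index)
--             argument 1, ...
--         ), ...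
--     ], where argument 1 should support the '=' operation and the empty argument is None.
--     """
--     role_tpfpfn_stats = [[0] * 3 for _ in range(role_num)]
--
--     if gold_records is None:
--         if pred_records is not None:  # FP
--             for pred_record in pred_records:
--                 assert len(pred_record) == role_num
--                 for role_idx, arg_tup in enumerate(pred_record):
--                     if arg_tup is not None:
--                         role_tpfpfn_stats[role_idx][1] += 1
--         else:  # ignore TN
--             pass
--     else:
--         if pred_records is None:  # FN
--             for gold_record in gold_records:
--                 assert len(gold_record) == role_num
--                 for role_idx, arg_tup in enumerate(gold_record):
--                     if arg_tup is not None: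
--                         role_tpfpfn_stats[role_idx][2] += 1
--         else:  # True Positive at the event level
--             # sort predicted event records by the non-empty count
--             # to remove the impact of the record order on evaluation
--             pred_records = sorted(pred_records,
--                                   key=lambda x: sum(1 for a in x if a is not None),
--                                   reverse=True)
--             gold_records = list(gold_records)
--
--             while len(pred_records) > 0 and len(gold_records) > 0:
--                 pred_record = pred_records[0]
--                 assert len(pred_record) == role_num
--
--                 # pick the most similar gold record
--                 _tmp_key = lambda gr: sum([1 for pa, ga in zip(pred_record, gr) if pa == ga])
--                 best_gr_idx = gold_records.index(max(gold_records, key=_tmp_key))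
--                 gold_record = gold_records[best_gr_idx]
--
--                 for role_idx, (pred_arg, gold_arg) in enumerate(zip(pred_record, gold_record)):
--                     if gold_arg is None:
--                         if pred_arg is not None:  # FP at the role level
--                             role_tpfpfn_stats[role_idx][1] += 1
--                         else:  # ignore TN
--                             pass
--                     else:
--                         if pred_arg is None:  # FN
--                             role_tpfpfn_stats[role_idx][2] += 1
--                         else:
--                             if pred_arg == gold_arg:  # TP
--                                 role_tpfpfn_stats[role_idx][0] += 1
--                             else:
--                                 role_tpfpfn_stats[role_idx][1] += 1
--                                 role_tpfpfn_stats[role_idx][2] += 1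
--
--                 del pred_records[0]
--                 del gold_records[best_gr_idx]
--
--             # remaining FP
--             for pred_record in pred_records:
--                 assert len(pred_record) == role_num
--                 for role_idx, arg_tup in enumerate(pred_record):
--                     if arg_tup is not None:
--                         role_tpfpfn_stats[role_idx][1] += 1
--             # remaining FN
--             for gold_record in gold_records:
--                 assert len(gold_record) == role_num
--                 for role_idx, arg_tup in enumerate(gold_record):
--                     if arg_tup is not None:
--                         role_tpfpfn_stats[role_idx][2] += 1
--
--     return role_tpfpfn_stats
-- ===== SOURCE B (Python) =====
-- def agg_ins_event_role_tpfpfn_stats(pred_record_mat, gold_record_mat, event_role_num_list):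
--     assert len(pred_record_mat) == len(gold_record_mat)
--     out = []
--     for idx in range(len(pred_record_mat)):
--         out.append(_event_stats(pred_record_mat[idx], gold_record_mat[idx],
--                                 event_role_num_list[idx]))
--     return out
--
--
-- def _nonempty_cols(records, role_num):
--     """Per-role count of records with a non-empty argument."""
--     for r in records:
--         assert len(r) == role_num
--     return [sum(1 for r in records if r[k] is not None) for k in range(role_num)]
--
--
-- def _event_stats(preds, golds, role_num):
--     if golds is None:
--         fp = _nonempty_cols(preds, role_num) if preds is not None else [0] * role_num
--         return [[0, f, 0] for f in fp]
--     if preds is None: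
--         return [[0, 0, f] for f in _nonempty_cols(golds, role_num)]
--     for r in preds:
--         assert len(r) == role_num
--     for r in golds:
--         assert len(r) == role_num
--     preds = sorted(preds, key=lambda x: sum(a is not None for a in x), reverse=True)
--     G = len(golds)
--     m = min(len(preds), G)
--     # score matrix, computed once
--     score = [[sum(pa == ga for pa, ga in zip(p, g)) for g in golds] for p in preds]
--     # index-based greedy matching over a used-column mask (first argmax wins)
--     used = [False] * G
--     matches = []
--     for i in range(m):
--         best = -1
--         for j in range(G):
--             if not used[j] and (best < 0 or score[i][j] > score[i][best]):
--                 best = j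
--         used[best] = True
--         matches.append((i, best))
--     # role-major accounting from the index pairs, leftover rows and unused columns
--     stats = []
--     for k in range(role_num):
--         tp = fp = fn = 0
--         for i, j in matches:
--             pa, ga = preds[i][k], golds[j][k]
--             if ga is None:
--                 if pa is not None:
--                     fp += 1
--             elif pa is None:
--                 fn += 1
--             elif pa == ga:
--                 tp += 1
--             else:
--                 fp += 1
--                 fn += 1
--         for p in preds[m:]:
--             if p[k] is not None:
--                 fp += 1
--         for j in range(G):
--             if not used[j] and golds[j][k] is not None:
--                 fn += 1
--         stats.append([tp, fp, fn])
--     return stats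
-- ===== Notes on version B (the rewrite author's own statement) =====
-- stated objective: alternative
-- what changed: B precomputes the P×G score matrix once and replaces A's while/del loop over shrinking lists with an index-based greedy pass over a used-column boolean mask (first argmax over unused columns, recorded as index pairs), then builds the table role-major from the matched index pairs, leftover rows and unused columns, instead of A's in-place cell increments interleaved with max()/list.index/del.
-- outside the precondition, e.g. on agg_ins_event_role_tpfpfn_stats([[[None]]], [[[None, 'x']]], [1]): A returns [[[0, 0, 0]]], B raises AssertionError
import Mathlib
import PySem

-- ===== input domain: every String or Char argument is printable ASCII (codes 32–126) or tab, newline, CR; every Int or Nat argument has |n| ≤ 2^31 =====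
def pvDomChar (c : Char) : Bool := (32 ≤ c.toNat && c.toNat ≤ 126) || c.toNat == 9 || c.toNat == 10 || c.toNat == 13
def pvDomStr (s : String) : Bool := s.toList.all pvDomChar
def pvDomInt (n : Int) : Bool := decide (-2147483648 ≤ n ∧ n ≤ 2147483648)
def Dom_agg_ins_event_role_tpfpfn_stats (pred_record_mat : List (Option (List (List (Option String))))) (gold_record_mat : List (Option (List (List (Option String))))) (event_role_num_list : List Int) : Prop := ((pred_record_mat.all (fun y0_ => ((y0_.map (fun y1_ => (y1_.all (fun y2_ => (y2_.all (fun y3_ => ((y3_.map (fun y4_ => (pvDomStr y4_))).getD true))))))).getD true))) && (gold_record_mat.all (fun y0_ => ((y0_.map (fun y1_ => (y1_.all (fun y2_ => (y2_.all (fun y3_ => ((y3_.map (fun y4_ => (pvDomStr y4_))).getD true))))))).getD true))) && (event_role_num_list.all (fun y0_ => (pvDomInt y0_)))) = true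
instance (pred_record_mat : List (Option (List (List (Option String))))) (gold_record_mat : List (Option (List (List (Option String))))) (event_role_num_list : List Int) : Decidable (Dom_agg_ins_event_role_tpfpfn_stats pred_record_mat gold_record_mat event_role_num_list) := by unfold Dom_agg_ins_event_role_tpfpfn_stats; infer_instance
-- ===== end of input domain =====

-- B replaces A's while/del loop over shrinking lists by a precomputed P×G score matrix plus an
-- index-based greedy pass over a used-column boolean mask, then builds the table role-major from
-- the matched index pairs; equivalence proved on Pre_ (shape assertions passing); same asymptotic cost.

-- ===== PORT A =====
-- the Python lambdas `sum(1 for a in x if a is not None)` and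
-- `sum(pa == ga for pa, ga in zip(pred_record, gr))`, used by both ports
def pvKey (x : List (Option String)) : Int := (x.countP (fun a => a.isSome) : Int)
def pvScore (pr gr : List (Option String)) : Int := ((pr.zip gr).countP (fun pg => pg.1 == pg.2) : Int)

-- `stats[r][c] += 1`
def pvBump (st : List (List Int)) (r c : Nat) : List (List Int) :=
  st.set r ((st.getD r []).set c ((st.getD r []).getD c 0 + 1))

-- `for role_idx, arg_tup in enumerate(record): if arg_tup is not None: stats[role_idx][c] += 1`
def pvCountRec (st : List (List Int)) (rec : List (Option String)) (c : Nat) : List (List Int) :=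
  (rec.zipIdx).foldl (fun st p => if p.1.isSome then pvBump st p.2 c else st) st

-- A's role loop over one matched (pred_record, gold_record) pair
def pvPairRec (st : List (List Int)) (pr gr : List (Option String)) : List (List Int) :=
  ((pr.zip gr).zipIdx).foldl (fun st q =>
    if q.1.2.isNone then (if q.1.1.isSome then pvBump st q.2 1 else st)
    else if q.1.1.isNone then pvBump st q.2 2
    else if q.1.1 == q.1.2 then pvBump st q.2 0
    else pvBump (pvBump st q.2 1) q.2 2) st

-- A's while-loop; returns (leftover pred_records, leftover gold_records, stats)
def pvWhileA (preds golds : List (List (Option String))) (st : List (List Int)) :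
    List (List (Option String)) × List (List (Option String)) × List (List Int) :=
  match preds with
  | [] => ([], golds, st)
  | pr :: rest =>
    if golds = [] then (pr :: rest, golds, st)
    else
      let best := (PySem.List.max? golds (fun gr => pvScore pr gr)).getD []
      let j := (PySem.List.index? golds best).getD 0
      pvWhileA rest (golds.eraseIdx j) (pvPairRec st pr (golds.getD j []))

def pvEventA (preds? golds? : Option (List (List (Option String)))) (role_num : Int) : List (List Int) :=
  let st := List.replicate role_num.toNat ([0, 0, 0] : List Int)
  match golds? with
  | none =>
    match preds? with
    | some preds => preds.foldl (fun st pr => pvCountRec st pr 1) st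
    | none => st
  | some golds =>
    match preds? with
    | none => golds.foldl (fun st gr => pvCountRec st gr 2) st
    | some preds =>
      let sp := PySem.List.sorted preds (fun x => pvKey x) true
      match pvWhileA sp golds st with
      | (lp, lg, st') =>
        lg.foldl (fun st gr => pvCountRec st gr 2)
          (lp.foldl (fun st pr => pvCountRec st pr 1) st')

def agg_ins_event_role_tpfpfn_stats (pred_record_mat : List (Option (List (List (Option String))))) (gold_record_mat : List (Option (List (List (Option String))))) (event_role_num_list : List Int) : List (List (List Int)) :=
  ((pred_record_mat.zip gold_record_mat).zipIdx).foldl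
    (fun acc q => acc ++ [pvEventA q.1.1 q.1.2 (PySem.List.pyGetD event_role_num_list (q.2 : Int) 0)]) []

-- ===== PORT B =====
-- `[sum(1 for r in records if r[k] is not None) for k in range(role_num)]`
def pvColCount (recs : List (List (Option String))) (k : Nat) : Int :=
  (recs.countP (fun r => (r.getD k none).isSome) : Int)
def pvNonemptyCols (recs : List (List (Option String))) (n : Nat) : List Int :=
  (List.range n).map (fun k => pvColCount recs k)

-- the score matrix, computed once
def pvScoreMat (sp golds : List (List (Option String))) : List (List Int) :=
  sp.map (fun p => golds.map (fun g => pvScore p g))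

-- inner `for j in range(G)` first-argmax over unused columns, `best` starting at -1
def pvBestUnused (row : List Int) (used : List Bool) (G : Nat) : Int :=
  (List.range G).foldl (fun best j =>
    if used.getD j false = false ∧ (best < 0 ∨ row.getD best.toNat 0 < row.getD j 0)
    then (j : Int) else best) (-1)

-- `for i in range(m): ...; used[best] = True; mts.append((i, best))`
def pvMatchMask (score : List (List Int)) (G m : Nat) : List (Nat × Nat) × List Bool :=
  (List.range m).foldl (fun st i =>
    let j := (pvBestUnused (score.getD i []) st.2 G).toNat
    (st.1 ++ [(i, j)], st.2.set j true))
    ([], List.replicate G false)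

-- one role's [tp, fp, fn]: matched index pairs, leftover rows, unused columns
def pvRoleRowB (sp golds : List (List (Option String))) (mts : List (Nat × Nat))
    (used : List Bool) (m G k : Nat) : List Int :=
  let t := mts.foldl (fun t ij =>
    let pa := (sp.getD ij.1 []).getD k none
    let ga := (golds.getD ij.2 []).getD k none
    if ga.isNone then (if pa.isSome then (t.1, t.2.1 + 1, t.2.2) else t)
    else if pa.isNone then (t.1, t.2.1, t.2.2 + 1)
    else if pa == ga then (t.1 + 1, t.2.1, t.2.2)
    else (t.1, t.2.1 + 1, t.2.2 + 1)) ((0, 0, 0) : Int × Int × Int)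
  let fp2 := ((sp.drop m).countP (fun p => (p.getD k none).isSome) : Int)
  let fn2 := ((List.range G).countP (fun j =>
    !(used.getD j false) && ((golds.getD j []).getD k none).isSome) : Int)
  [t.1, t.2.1 + fp2, t.2.2 + fn2]

def pvEventB (preds? golds? : Option (List (List (Option String)))) (n : Int) : List (List Int) :=
  match golds? with
  | none =>
    (match preds? with
     | some preds => pvNonemptyCols preds n.toNat
     | none => List.replicate n.toNat (0 : Int)).map (fun f => [0, f, 0])
  | some golds =>
    match preds? with
    | none => (pvNonemptyCols golds n.toNat).map (fun f => [0, 0, f])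
    | some preds =>
      let sp := PySem.List.sorted preds (fun x => pvKey x) true
      let G := golds.length
      let m := min sp.length G
      let score := pvScoreMat sp golds
      let mu := pvMatchMask score G m
      (List.range n.toNat).map (fun k => pvRoleRowB sp golds mu.1 mu.2 m G k)

def agg_ins_event_role_tpfpfn_stats_alt (pred_record_mat : List (Option (List (List (Option String))))) (gold_record_mat : List (Option (List (List (Option String))))) (event_role_num_list : List Int) : List (List (List Int)) :=
  (List.range pred_record_mat.length).map (fun idx =>
    pvEventB (pred_record_mat.getD idx none) (gold_record_mat.getD idx none)
      (PySem.List.pyGetD event_role_num_list (idx : Int) 0))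

-- ===== PRECONDITION & SPEC =====
-- Pre_ excludes exactly the inputs on which A raises (mismatched matrix lengths, a too-short
-- role-number list, a record failing A's `assert len(record) == role_num`), EXCEPT that A itself
-- only length-checks gold records that are left over by the greedy matching: on inputs whose
-- mismatched gold records all happen to be consumed by the matcher A still returns (an accident
-- of the matching order) while B's up-front shape checks raise, so those are excluded too.
def Pre_agg_ins_event_role_tpfpfn_stats (pred_record_mat : List (Option (List (List (Option String))))) (gold_record_mat : List (Option (List (List (Option String))))) (event_role_num_list : List Int) : Prop :=
  pred_record_mat.length = gold_record_mat.length ∧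
  pred_record_mat.length ≤ event_role_num_list.length ∧
  ∀ i < pred_record_mat.length,
    (∀ r ∈ (pred_record_mat.getD i none).getD [], (r.length : Int) = event_role_num_list.getD i 0) ∧
    (∀ r ∈ (gold_record_mat.getD i none).getD [], (r.length : Int) = event_role_num_list.getD i 0)
instance (pred_record_mat : List (Option (List (List (Option String))))) (gold_record_mat : List (Option (List (List (Option String))))) (event_role_num_list : List Int) : Decidable (Pre_agg_ins_event_role_tpfpfn_stats pred_record_mat gold_record_mat event_role_num_list) := by unfold Pre_agg_ins_event_role_tpfpfn_stats; infer_instance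

def pvWitness_agg_ins_event_role_tpfpfn_stats : List (Option (List (List (Option String)))) × List (Option (List (List (Option String)))) × List Int :=
  ([some [[some "a"]], none], [some [[none]], some [[some "a"], [none]]], [1, 1])

def Spec_agg_ins_event_role_tpfpfn_stats (pred_record_mat : List (Option (List (List (Option String))))) (gold_record_mat : List (Option (List (List (Option String))))) (event_role_num_list : List Int) (out : List (List (List Int))) : Prop := out = agg_ins_event_role_tpfpfn_stats_alt pred_record_mat gold_record_mat event_role_num_list
instance (pred_record_mat : List (Option (List (List (Option String))))) (gold_record_mat : List (Option (List (List (Option String))))) (event_role_num_list : List Int) (out : List (List (List Int))) : Decidable (Spec_agg_ins_event_role_tpfpfn_stats pred_record_mat gold_record_mat event_role_num_list out) := by unfold Spec_agg_ins_event_role_tpfpfn_stats; infer_instance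

-- ===== CLAIM (what is proved, stated in full; the proofs are below) =====
def Claim_equal_agg_ins_event_role_tpfpfn_stats : Prop := ∀ (pred_record_mat : List (Option (List (List (Option String))))) (gold_record_mat : List (Option (List (List (Option String))))) (event_role_num_list : List Int), Dom_agg_ins_event_role_tpfpfn_stats pred_record_mat gold_record_mat event_role_num_list → Pre_agg_ins_event_role_tpfpfn_stats pred_record_mat gold_record_mat event_role_num_list → Spec_agg_ins_event_role_tpfpfn_stats pred_record_mat gold_record_mat event_role_num_list (agg_ins_event_role_tpfpfn_stats pred_record_mat gold_record_mat event_role_num_list)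

-- ===== LEMMAS AND PROOFS =====

-- cell / shape bookkeeping for A's mutable stats matrix
def pvCell (st : List (List Int)) (k c : Nat) : Int := (st.getD k []).getD c 0
def pvRows3 (st : List (List Int)) : Prop := ∀ row ∈ st, row.length = 3
def pvDelta (g p : Option String) : Int × Int × Int :=
  match g, p with
  | none, some _ => (0, 1, 0)
  | none, none => (0, 0, 0)
  | some _, none => (0, 0, 1)
  | some gs, some ps => if ps == gs then (1, 0, 0) else (0, 1, 1)
def pvComp (c : Nat) (t : Int × Int × Int) : Int :=
  match c with | 0 => t.1 | 1 => t.2.1 | 2 => t.2.2 | _ => 0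
def pvUnit (c : Nat) : Int × Int × Int :=
  match c with | 0 => (1, 0, 0) | 1 => (0, 1, 0) | 2 => (0, 0, 1) | _ => (0, 0, 0)

theorem pvComp_unit (c c' : Nat) (hc : c < 3) (hc' : c' < 3) :
    pvComp c (pvUnit c') = if c = c' then 1 else 0 := by
  interval_cases c <;> interval_cases c' <;> simp [pvComp, pvUnit]

theorem pvComp_zero (c : Nat) : pvComp c (0, 0, 0) = 0 := by
  match c with | 0 | 1 | 2 => rfl | n + 3 => rfl

theorem pvBump_length (st : List (List Int)) (r c : Nat) : (pvBump st r c).length = st.length :=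
  List.length_set

theorem pvRows3_bump (st : List (List Int)) (r c : Nat) (h : pvRows3 st) : pvRows3 (pvBump st r c) := by
  intro row hrow
  by_cases hr : r < st.length
  · rcases List.mem_or_eq_of_mem_set hrow with h1 | h1
    · exact h row h1
    · subst h1
      rw [List.length_set]
      exact h _ (List.getD_eq_getElem st [] hr ▸ List.getElem_mem hr)
  · unfold pvBump at hrow
    rw [List.set_eq_of_length_le (Nat.le_of_not_lt hr)] at hrow
    exact h row hrow
theorem pvCell_bump (st : List (List Int)) (r c' k c : Nat) (h3 : pvRows3 st)
    (hr : r < st.length) (hc' : c' < 3) :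
    pvCell (pvBump st r c') k c = if k = r ∧ c = c' then pvCell st k c + 1 else pvCell st k c := by
  have hrow3 : (st.getD r []).length = 3 := by
    rw [List.getD_eq_getElem st [] hr]; exact h3 _ (List.getElem_mem hr)
  have hset : ∀ (l : List (List Int)) (i j : Nat) (a : List Int),
      (l.set i a).getD j [] = if i = j ∧ i < l.length then a else l.getD j [] := by
    intro l i j a
    rw [List.getD_eq_getElem?_getD, List.getElem?_set]
    by_cases h1 : i = j
    · subst h1
      by_cases h2 : i < l.length
      · simp [h2]
      · simp [h2, List.getD_eq_getElem?_getD]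
    · simp [h1, List.getD_eq_getElem?_getD]
  have hsetI : ∀ (l : List Int) (i j : Nat) (a : Int),
      (l.set i a).getD j 0 = if i = j ∧ i < l.length then a else l.getD j 0 := by
    intro l i j a
    rw [List.getD_eq_getElem?_getD, List.getElem?_set]
    by_cases h1 : i = j
    · subst h1
      by_cases h2 : i < l.length
      · simp [h2]
      · simp [h2, List.getD_eq_getElem?_getD]
    · simp [h1, List.getD_eq_getElem?_getD]
  unfold pvCell pvBump
  rw [hset]
  by_cases hk : r = k
  · rw [if_pos ⟨hk, hr⟩, hsetI]
    subst hk
    by_cases hcc : c' = c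
    · subst hcc
      rw [if_pos ⟨rfl, by omega⟩, if_pos ⟨rfl, rfl⟩]
    · rw [if_neg (by tauto), if_neg (by tauto)]
  · rw [if_neg (by tauto), if_neg (by tauto)]

-- one generic pass: a fold over `l.zipIdx s` of bump-style steps changes cell (k, c) by the
-- step's contribution v at position k
theorem pvCell_fold {α : Type} (step : List (List Int) → α × Nat → List (List Int))
    (v : α → Int × Int × Int) (d : α) (k c : Nat)
    (hL : ∀ st x i, (step st (x, i)).length = st.length)
    (hR : ∀ st x i, pvRows3 st → pvRows3 (step st (x, i)))
    (hC : ∀ st x i, pvRows3 st → i < st.length →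
        pvCell (step st (x, i)) k c = pvCell st k c + (if k = i then pvComp c (v x) else 0)) :
    ∀ (l : List α) (s : Nat) (st : List (List Int)), pvRows3 st → s + l.length ≤ st.length →
      pvCell ((l.zipIdx s).foldl step st) k c =
        pvCell st k c + (if s ≤ k ∧ k < s + l.length then pvComp c (v (l.getD (k - s) d)) else 0) := by
  intro l
  induction l with
  | nil =>
    intro s st h3 hlen
    rw [List.zipIdx_nil, List.foldl_nil]
    simp only [List.length_nil]
    rw [if_neg (by omega), add_zero]
  | cons a l ih =>
    intro s st h3 hlen
    simp only [List.length_cons] at hlen ⊢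
    rw [List.zipIdx_cons, List.foldl_cons,
      ih (s + 1) (step st (a, s)) (hR st a s h3) (by rw [hL]; omega),
      hC st a s h3 (by omega)]
    by_cases hk : k = s
    · subst hk
      rw [if_pos rfl, if_neg (by omega), if_pos (by omega), add_zero, Nat.sub_self,
        List.getD_cons_zero]
    · rw [if_neg hk, add_zero]
      by_cases h2 : s + 1 ≤ k ∧ k < s + 1 + l.length
      · rw [if_pos h2, if_pos (by omega)]
        have hks : k - s = (k - (s + 1)) + 1 := by omega
        rw [hks, List.getD_cons_succ]
      · rw [if_neg h2, if_neg (by omega)]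

-- generic preservation of length and row-shape through any fold of shape-preserving steps
theorem pvPreserve {α : Type} (f : List (List Int) → α → List (List Int))
    (hL : ∀ st x, (f st x).length = st.length)
    (hR : ∀ st x, pvRows3 st → pvRows3 (f st x)) :
    ∀ (l : List α) (st : List (List Int)),
      (l.foldl f st).length = st.length ∧ (pvRows3 st → pvRows3 (l.foldl f st)) := by
  intro l
  induction l with
  | nil => exact fun st => ⟨rfl, id⟩
  | cons x t ih =>
    intro st
    refine ⟨(ih (f st x)).1.trans (hL st x), fun h => (ih (f st x)).2 (hR st x h)⟩

theorem pvCountRec_length (st : List (List Int)) (rec : List (Option String)) (c : Nat) :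
    (pvCountRec st rec c).length = st.length := by
  unfold pvCountRec
  exact (pvPreserve _ (fun st x => by split <;> simp [pvBump_length])
    (fun st x h => by split
                      · exact pvRows3_bump _ _ _ h
                      · exact h) rec.zipIdx st).1
theorem pvCountRec_rows3 (st : List (List Int)) (rec : List (Option String)) (c : Nat)
    (h : pvRows3 st) : pvRows3 (pvCountRec st rec c) := by
  unfold pvCountRec
  exact (pvPreserve _ (fun st x => by split <;> simp [pvBump_length])
    (fun st x h => by split
                      · exact pvRows3_bump _ _ _ h
                      · exact h) rec.zipIdx st).2 h
theorem pvPairRec_length (st : List (List Int)) (pr gr : List (Option String)) :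
    (pvPairRec st pr gr).length = st.length := by
  unfold pvPairRec
  exact (pvPreserve _ (fun st x => by split_ifs <;> simp [pvBump_length])
    (fun st x h => by split_ifs <;>
      first
        | exact h
        | exact pvRows3_bump _ _ _ h
        | exact pvRows3_bump _ _ _ (pvRows3_bump _ _ _ h)) (pr.zip gr).zipIdx st).1
theorem pvPairRec_rows3 (st : List (List Int)) (pr gr : List (Option String))
    (h : pvRows3 st) : pvRows3 (pvPairRec st pr gr) := by
  unfold pvPairRec
  exact (pvPreserve _ (fun st x => by split_ifs <;> simp [pvBump_length])
    (fun st x h => by split_ifs <;>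
      first
        | exact h
        | exact pvRows3_bump _ _ _ h
        | exact pvRows3_bump _ _ _ (pvRows3_bump _ _ _ h)) (pr.zip gr).zipIdx st).2 h

theorem pvCell_countRec (st : List (List Int)) (rec : List (Option String)) (c' k c : Nat)
    (h3 : pvRows3 st) (hlen : rec.length ≤ st.length) (hc : c < 3) (hc' : c' < 3) :
    pvCell (pvCountRec st rec c') k c =
      pvCell st k c + (if k < rec.length ∧ c = c' ∧ (rec.getD k none).isSome then 1 else 0) := by
  unfold pvCountRec
  rw [show rec.zipIdx = rec.zipIdx 0 from rfl,
    pvCell_fold _ (fun a => if a.isSome then pvUnit c' else ((0, 0, 0) : Int × Int × Int)) none k c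
      (fun st x i => by split <;> simp [pvBump_length])
      (fun st x i h => by split
                          · exact pvRows3_bump _ _ _ h
                          · exact h)
      (fun st x i h3 hi => by
        cases hx : x.isSome
        · simp [hx, pvComp_zero]
        · simp only [hx, if_true]
          rw [pvCell_bump st i c' k c h3 hi hc', pvComp_unit c c' hc hc']
          split_ifs <;> first | rfl | (exfalso; omega) | simp)
      rec 0 st h3 (by omega)]
  rw [Nat.sub_zero]
  congr 1
  by_cases h1 : k < rec.length
  · rw [if_pos (by omega)]
    by_cases hs : (rec.getD k none).isSome
    · rw [if_pos hs, pvComp_unit c c' hc hc']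
      by_cases hcc : c = c'
      · rw [if_pos hcc, if_pos ⟨h1, hcc, hs⟩]
      · rw [if_neg hcc, if_neg (by tauto)]
    · rw [if_neg hs, pvComp_zero, if_neg (by tauto)]
  · rw [if_neg (by omega), if_neg (by tauto)]

theorem pvCell_pairRec (st : List (List Int)) (pr gr : List (Option String)) (k c : Nat)
    (h3 : pvRows3 st) (hlen : (pr.zip gr).length ≤ st.length) (hc : c < 3) :
    pvCell (pvPairRec st pr gr) k c =
      pvCell st k c + (if k < (pr.zip gr).length then
        pvComp c (pvDelta ((pr.zip gr).getD k (none, none)).2 ((pr.zip gr).getD k (none, none)).1) else 0) := by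
  unfold pvPairRec
  rw [show (pr.zip gr).zipIdx = (pr.zip gr).zipIdx 0 from rfl,
    pvCell_fold _ (fun x => pvDelta x.2 x.1) (none, none) k c
      (fun st x i => by split_ifs <;> simp [pvBump_length])
      (fun st x i h => by split_ifs <;>
        first
          | exact h
          | exact pvRows3_bump _ _ _ h
          | exact pvRows3_bump _ _ _ (pvRows3_bump _ _ _ h))
      (fun st x i h3 hi => by
        rcases x with ⟨pa, ga⟩
        dsimp only
        rcases ga with _ | gs <;> rcases pa with _ | ps
        · simp [pvDelta, pvComp_zero]
        · simp only [Option.isNone_none, Option.isSome_some, reduceIte]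
          rw [pvCell_bump st i 1 k c h3 hi (by omega)]
          have hv : pvComp c (pvDelta none (some ps)) = pvComp c (pvUnit 1) := rfl
          rw [hv, pvComp_unit c 1 hc (by omega)]
          split_ifs <;> first | rfl | (exfalso; omega) | simp
        · simp only [Option.isNone_none, Option.isNone_some, Bool.false_eq_true, reduceIte]
          rw [pvCell_bump st i 2 k c h3 hi (by omega)]
          have hv : pvComp c (pvDelta (some gs) none) = pvComp c (pvUnit 2) := rfl
          rw [hv, pvComp_unit c 2 hc (by omega)]
          split_ifs <;> first | rfl | (exfalso; omega) | simp
        · simp only [Option.isNone_some, Bool.false_eq_true, reduceIte,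
            show ((some ps == some gs)) = (ps == gs) from by simp]
          by_cases heq : (ps == gs) = true
          · rw [if_pos heq, pvCell_bump st i 0 k c h3 hi (by omega)]
            have hv : pvComp c (pvDelta (some gs) (some ps)) = pvComp c (pvUnit 0) := by
              simp [pvDelta, heq, pvUnit]
            rw [hv, pvComp_unit c 0 hc (by omega)]
            split_ifs <;> first | rfl | (exfalso; omega) | simp
          · rw [if_neg heq,
              pvCell_bump _ i 2 k c (pvRows3_bump _ _ _ h3) (by rw [pvBump_length]; exact hi)
                (by omega),
              pvCell_bump st i 1 k c h3 hi (by omega)]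
            have hd : pvDelta (some gs) (some ps) = ((0, 1, 1) : Int × Int × Int) := by
              simp [pvDelta, heq]
            rw [hd]
            have hcomp : pvComp c ((0, 1, 1) : Int × Int × Int) =
                (if c = 1 then (1 : Int) else 0) + (if c = 2 then 1 else 0) := by
              interval_cases c <;> simp [pvComp]
            rw [hcomp]
            split_ifs <;> first | rfl | (exfalso; omega) | simp)
      (pr.zip gr) 0 st h3 (by omega)]
  rw [Nat.sub_zero]
  congr 1
  by_cases hkk : k < (pr.zip gr).length
  · rw [if_pos (by omega), if_pos hkk]
  · rw [if_neg (by omega), if_neg hkk]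

-- fold of pvPairRec over the matched pairs
theorem pvCell_foldP (nn k c : Nat) (hk : k < nn) (hc : c < 3) :
    ∀ (pairs : List (List (Option String) × List (Option String))) (st : List (List Int)),
      pvRows3 st → st.length = nn →
      (∀ pg ∈ pairs, pg.1.length = nn ∧ pg.2.length = nn) →
      pvCell (pairs.foldl (fun st pg => pvPairRec st pg.1 pg.2) st) k c =
        pvCell st k c +
          (pairs.map (fun pg => pvComp c (pvDelta (pg.2.getD k none) (pg.1.getD k none)))).sum := by
  intro pairs
  induction pairs with
  | nil => intro st _ _ _; simp
  | cons pg rest ih =>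
    intro st h3 hst hp
    obtain ⟨hp1, hp2⟩ := hp pg List.mem_cons_self
    have hziplen : (pg.1.zip pg.2).length = nn := by rw [List.length_zip, hp1, hp2]; omega
    rw [List.foldl_cons,
      ih (pvPairRec st pg.1 pg.2) (pvPairRec_rows3 _ _ _ h3)
        ((pvPairRec_length st pg.1 pg.2).trans hst)
        (fun x hx => hp x (List.mem_cons_of_mem _ hx)),
      pvCell_pairRec st pg.1 pg.2 k c h3 (by omega) hc,
      if_pos (by omega)]
    have hzip : (pg.1.zip pg.2).getD k (none, none) = (pg.1.getD k none, pg.2.getD k none) := by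
      rw [List.getD_eq_getElem _ _ (by omega), List.getElem_zip,
        List.getD_eq_getElem _ _ (by omega), List.getD_eq_getElem _ _ (by omega)]
    rw [hzip, List.map_cons, List.sum_cons]
    ring

-- fold of pvCountRec over leftover records
theorem pvCell_foldC (nn k c c' : Nat) (hk : k < nn) (hc : c < 3) (hc' : c' < 3) :
    ∀ (recs : List (List (Option String))) (st : List (List Int)),
      pvRows3 st → st.length = nn → (∀ r ∈ recs, r.length = nn) →
      pvCell (recs.foldl (fun st r => pvCountRec st r c') st) k c =
        pvCell st k c + (if c = c' then (recs.countP (fun r => (r.getD k none).isSome) : Int) else 0) := by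
  intro recs
  induction recs with
  | nil => intro st _ _ _; simp
  | cons r rest ih =>
    intro st h3 hst hr
    have hrlen : r.length = nn := hr r List.mem_cons_self
    rw [List.foldl_cons,
      ih (pvCountRec st r c') (pvCountRec_rows3 _ _ _ h3)
        ((pvCountRec_length st r c').trans hst)
        (fun x hx => hr x (List.mem_cons_of_mem _ hx)),
      pvCell_countRec st r c' k c h3 (by omega) hc hc',
      List.countP_cons]
    push_cast
    by_cases hcc : c = c'
    · rw [if_pos hcc, if_pos hcc]
      by_cases hs : (r.getD k none).isSome
      · rw [if_pos ⟨by omega, hcc, hs⟩, if_pos (by simpa using hs)]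
        ring
      · rw [if_neg (by tauto), if_neg (by simpa using hs)]
        ring
    · rw [if_neg hcc, if_neg hcc, if_neg (by tauto)]
      ring

theorem pvCell_init (nn k c : Nat) : pvCell (List.replicate nn ([0, 0, 0] : List Int)) k c = 0 := by
  unfold pvCell
  by_cases hk : k < nn
  · rw [List.getD_replicate _ hk]
    rcases c with _ | _ | _ | c <;> simp
  · have h0 : (List.replicate nn ([0, 0, 0] : List Int)).getD k [] = [] := by
      rw [List.getD_eq_getElem?_getD, List.getElem?_eq_none (by simp; omega)]
      rfl
    rw [h0, List.getD_nil]

-- ---- the record-pair greedy matcher used as the common reference point of both ports ----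
def pvMatchGreedy (preds golds : List (List (Option String))) :
    List (List (Option String) × List (Option String)) × List (List (Option String)) × List (List (Option String)) :=
  match preds with
  | [] => ([], [], golds)
  | pred :: rest =>
    match golds with
    | [] => ([], pred :: rest, [])
    | _ :: _ =>
      let scores := golds.map (fun gr => pvScore pred gr)
      let j := (PySem.List.index? scores ((PySem.List.max? scores (fun s => s)).getD 0)).getD 0
      let r := pvMatchGreedy rest (golds.take j ++ golds.drop (j + 1))
      ((pred, golds.getD j []) :: r.1, r.2.1, r.2.2)

-- reference role row over record pairs and leftovers
def pvRoleRow (pairs : List (List (Option String) × List (Option String)))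
    (lp lg : List (List (Option String))) (k : Nat) : List Int :=
  let t := pairs.foldl (fun t pg =>
    if (pg.2.getD k none).isNone then
      (if (pg.1.getD k none).isSome then (t.1, t.2.1 + 1, t.2.2) else t)
    else if (pg.1.getD k none).isNone then (t.1, t.2.1, t.2.2 + 1)
    else if pg.1.getD k none == pg.2.getD k none then (t.1 + 1, t.2.1, t.2.2)
    else (t.1, t.2.1 + 1, t.2.2 + 1)) ((0, 0, 0) : Int × Int × Int)
  [t.1, t.2.1 + pvColCount lp k, t.2.2 + pvColCount lg k]

theorem pvTriple_fold (k : Nat) :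
    ∀ (pairs : List (List (Option String) × List (Option String))) (t : Int × Int × Int),
      pairs.foldl (fun t pg =>
        if (pg.2.getD k none).isNone then
          (if (pg.1.getD k none).isSome then (t.1, t.2.1 + 1, t.2.2) else t)
        else if (pg.1.getD k none).isNone then (t.1, t.2.1, t.2.2 + 1)
        else if pg.1.getD k none == pg.2.getD k none then (t.1 + 1, t.2.1, t.2.2)
        else (t.1, t.2.1 + 1, t.2.2 + 1)) t =
      (t.1 + (pairs.map (fun pg => pvComp 0 (pvDelta (pg.2.getD k none) (pg.1.getD k none)))).sum,
       t.2.1 + (pairs.map (fun pg => pvComp 1 (pvDelta (pg.2.getD k none) (pg.1.getD k none)))).sum,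
       t.2.2 + (pairs.map (fun pg => pvComp 2 (pvDelta (pg.2.getD k none) (pg.1.getD k none)))).sum) := by
  intro pairs
  induction pairs with
  | nil => intro t; simp
  | cons pg rest ih =>
    intro t
    rw [List.foldl_cons, ih, List.map_cons, List.map_cons, List.map_cons,
      List.sum_cons, List.sum_cons, List.sum_cons]
    rcases hga : pg.2.getD k none with _ | gs <;> rcases hpa : pg.1.getD k none with _ | ps
    · simp only [Option.isNone_none, if_true, Option.isSome_none, Bool.false_eq_true, if_false,
        pvDelta, pvComp]
      simp [Prod.ext_iff]
      try ring
      try exact ⟨trivial, trivial⟩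
    · simp only [Option.isNone_none, if_true, Option.isSome_some, if_true, pvDelta, pvComp]
      simp [Prod.ext_iff]
      try ring
      try exact ⟨trivial, trivial⟩
    · simp only [Option.isNone_some, Bool.false_eq_true, if_false, Option.isNone_none, if_true,
        pvDelta, pvComp]
      simp [Prod.ext_iff]
      try ring
      try exact ⟨trivial, trivial⟩
    · simp only [Option.isNone_some, Bool.false_eq_true, if_false]
      by_cases heq : (ps == gs) = true
      · simp only [show (some ps == some gs) = true by simpa using heq, if_true, pvDelta, heq,
          pvComp]
        simp [Prod.ext_iff]
        try ring
        try exact ⟨trivial, trivial⟩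
      try ring
      try exact ⟨trivial, trivial⟩
      · simp only [show (some ps == some gs) = false by simpa using heq, Bool.false_eq_true,
          if_false, pvDelta, heq, pvComp]
        simp [Prod.ext_iff]
        try ring
        try exact ⟨trivial, trivial⟩
      try ring
      try exact ⟨trivial, trivial⟩

theorem pvRoleRow_eq (pairs : List (List (Option String) × List (Option String)))
    (lp lg : List (List (Option String))) (k : Nat) :
    pvRoleRow pairs lp lg k =
      [(pairs.map (fun pg => pvComp 0 (pvDelta (pg.2.getD k none) (pg.1.getD k none)))).sum,
       (pairs.map (fun pg => pvComp 1 (pvDelta (pg.2.getD k none) (pg.1.getD k none)))).sum + pvColCount lp k,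
       (pairs.map (fun pg => pvComp 2 (pvDelta (pg.2.getD k none) (pg.1.getD k none)))).sum + pvColCount lg k] := by
  unfold pvRoleRow
  rw [pvTriple_fold]
  simp

-- ---- the greedy selection: A's max(golds,key)+index == first max of the score list ----
def pvFirstMax {α : Type} (key : α → Int) (x : α) : List α → α
  | [] => x
  | y :: t => if key x < key (pvFirstMax key y t) then pvFirstMax key y t else x

theorem pvFirstMax_mem {α : Type} (key : α → Int) :
    ∀ (t : List α) (x : α), pvFirstMax key x t ∈ x :: t := by
  intro t
  induction t with
  | nil => intro x; simp [pvFirstMax]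
  | cons y t ih =>
    intro x
    simp only [pvFirstMax]
    split
    · exact List.mem_cons_of_mem x (ih y)
    · exact List.mem_cons_self

theorem pvFoldMax_eq {α : Type} (key : α → Int) :
    ∀ (l : List α) (m0 : α),
      l.foldl (fun acc x => match acc with
        | none => some x
        | some m => if key m < key x then some x else some m) (some m0) =
      some (pvFirstMax key m0 l) := by
  intro l
  induction l with
  | nil => intro m0; rfl
  | cons y t ih =>
    intro m0
    rw [List.foldl_cons]
    show List.foldl _ (if key m0 < key y then some y else some m0) t = _
    rw [← apply_ite some (key m0 < key y) y m0, ih]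
    congr 1
    cases t with
    | nil =>
      simp only [pvFirstMax]
    | cons z t' =>
      simp only [pvFirstMax]
      by_cases h1 : key m0 < key y <;> by_cases h2 : key y < key (pvFirstMax key z t') <;>
        simp only [h1, h2] <;>
        split_ifs <;> first | rfl | (exfalso; first | assumption | linarith)

theorem pvMax?_eq {α : Type} (key : α → Int) (g : α) (rest : List α) :
    PySem.List.max? (g :: rest) key = some (pvFirstMax key g rest) := by
  show List.foldl _ none (g :: rest) = _
  rw [List.foldl_cons]
  exact pvFoldMax_eq key rest g

theorem pvFirstMax_map {α : Type} (key : α → Int) :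
    ∀ (t : List α) (x : α), pvFirstMax (fun s => s) (key x) (t.map key) = key (pvFirstMax key x t) := by
  intro t
  induction t with
  | nil => intro x; rfl
  | cons y t ih =>
    intro x
    simp only [List.map_cons, pvFirstMax, ih]
    rw [apply_ite key]

theorem pvIdx_eq {α : Type} [BEq α] [LawfulBEq α] (key : α → Int) :
    ∀ (rest : List α) (g : α),
      (List.idxOf? (pvFirstMax key g rest) (g :: rest)).getD 0 =
      (List.idxOf? (key (pvFirstMax key g rest)) ((g :: rest).map key)).getD 0 := by
  intro rest
  induction rest with
  | nil =>
    intro g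
    simp [pvFirstMax, List.idxOf?_cons]
  | cons y t ih =>
    intro g
    by_cases h1 : key g < key (pvFirstMax key y t)
    · have hfm : pvFirstMax key g (y :: t) = pvFirstMax key y t := by
        simp only [pvFirstMax]; rw [if_pos h1]
      have hne : g ≠ pvFirstMax key y t := by
        intro h; rw [h] at h1; exact lt_irrefl _ h1
      have hkne : key g ≠ key (pvFirstMax key y t) := ne_of_lt h1
      have hm : pvFirstMax key y t ∈ y :: t := pvFirstMax_mem key t y
      have hkm : key (pvFirstMax key y t) ∈ (y :: t).map key := List.mem_map_of_mem hm
      obtain ⟨i, hi⟩ := Option.isSome_iff_exists.mp (List.isSome_idxOf?.mpr hm)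
      obtain ⟨i2, hi2⟩ := Option.isSome_iff_exists.mp (List.isSome_idxOf?.mpr hkm)
      rw [hfm, List.idxOf?_cons]
      rw [if_neg (by simp [hne]), hi]
      rw [List.map_cons, List.idxOf?_cons]
      rw [if_neg (by simp [hkne]), hi2]
      simp only [Option.map_some, Option.getD_some]
      have H := ih y
      rw [hi, hi2] at H
      simp only [Option.getD_some] at H
      omega
    · have hfm : pvFirstMax key g (y :: t) = g := by
        simp only [pvFirstMax]; rw [if_neg h1]
      rw [hfm, List.idxOf?_cons, if_pos (by simp), List.map_cons, List.idxOf?_cons,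
        if_pos (by simp)]

-- packaged selection equality + bound, in the exact shape pvWhileA / pvMatchGreedy use
theorem pvSel_eq (pr g : List (Option String)) (rest : List (List (Option String))) :
    ((PySem.List.index? (g :: rest) ((PySem.List.max? (g :: rest) (fun gr => pvScore pr gr)).getD [])).getD 0 =
      (PySem.List.index? ((g :: rest).map (fun gr => pvScore pr gr))
        ((PySem.List.max? ((g :: rest).map (fun gr => pvScore pr gr)) (fun s => s)).getD 0)).getD 0) ∧
    (PySem.List.index? (g :: rest) ((PySem.List.max? (g :: rest) (fun gr => pvScore pr gr)).getD [])).getD 0 <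
      (g :: rest).length := by
  have hmax := pvMax?_eq (fun gr => pvScore pr gr) g rest
  have hmax2 := pvMax?_eq (fun s : Int => s) (pvScore pr g) (rest.map (fun gr => pvScore pr gr))
  have hm : pvFirstMax (fun gr => pvScore pr gr) g rest ∈ g :: rest :=
    pvFirstMax_mem _ rest g
  constructor
  · simp only [PySem.List.index?]
    rw [hmax, Option.getD_some, List.map_cons, hmax2, Option.getD_some,
      show pvFirstMax (fun s => s) (pvScore pr g) (rest.map (fun gr => pvScore pr gr)) =
        pvScore pr (pvFirstMax (fun gr => pvScore pr gr) g rest) from pvFirstMax_map _ rest g]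
    have H := pvIdx_eq (fun gr => pvScore pr gr) rest g
    simp only [List.map_cons] at H
    exact H
  · simp only [PySem.List.index?]
    rw [hmax, Option.getD_some]
    obtain ⟨i, hi⟩ := Option.isSome_iff_exists.mp (List.isSome_idxOf?.mpr hm)
    rw [hi, Option.getD_some]
    obtain ⟨hlt, -, -⟩ := List.idxOf?_eq_some_iff.mp hi
    exact hlt

-- A's while-loop is the reference matcher followed by the fold of the pair-accounting
theorem pvWhile_eq : ∀ (preds golds : List (List (Option String))) (st : List (List Int)),
    pvWhileA preds golds st =
      ((pvMatchGreedy preds golds).2.1, (pvMatchGreedy preds golds).2.2,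
        (pvMatchGreedy preds golds).1.foldl (fun st pg => pvPairRec st pg.1 pg.2) st) := by
  intro preds
  induction preds with
  | nil => intro golds st; rfl
  | cons pr rest ih =>
    intro golds st
    cases golds with
    | nil => simp [pvWhileA, pvMatchGreedy]
    | cons g0 gr =>
      obtain ⟨hjeq, hjlt⟩ := pvSel_eq pr g0 gr
      simp only [pvWhileA, pvMatchGreedy]
      rw [if_neg (by simp), List.eraseIdx_eq_take_drop_succ, hjeq, ih, List.foldl_cons]

theorem pvMG_mem : ∀ (preds golds : List (List (Option String))),
    (∀ pg ∈ (pvMatchGreedy preds golds).1, pg.1 ∈ preds ∧ pg.2 ∈ golds) ∧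
    (∀ p ∈ (pvMatchGreedy preds golds).2.1, p ∈ preds) ∧
    (∀ g ∈ (pvMatchGreedy preds golds).2.2, g ∈ golds) := by
  intro preds
  induction preds with
  | nil => intro golds; simp [pvMatchGreedy]
  | cons pred rest ih =>
    intro golds
    cases golds with
    | nil => simp [pvMatchGreedy]
    | cons g0 gr =>
      obtain ⟨hjeq, hjlt⟩ := pvSel_eq pred g0 gr
      rw [hjeq] at hjlt
      obtain ⟨ihp, ihl, ihg⟩ := ih ((g0 :: gr).take
        ((PySem.List.index? ((g0 :: gr).map (fun gr => pvScore pred gr))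
          ((PySem.List.max? ((g0 :: gr).map (fun gr => pvScore pred gr)) (fun s => s)).getD 0)).getD 0) ++
        (g0 :: gr).drop
        ((PySem.List.index? ((g0 :: gr).map (fun gr => pvScore pred gr))
          ((PySem.List.max? ((g0 :: gr).map (fun gr => pvScore pred gr)) (fun s => s)).getD 0)).getD 0 + 1))
      have hsub : ∀ x, x ∈ (g0 :: gr).take
          ((PySem.List.index? ((g0 :: gr).map (fun gr => pvScore pred gr))
            ((PySem.List.max? ((g0 :: gr).map (fun gr => pvScore pred gr)) (fun s => s)).getD 0)).getD 0) ++
          (g0 :: gr).drop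
          ((PySem.List.index? ((g0 :: gr).map (fun gr => pvScore pred gr))
            ((PySem.List.max? ((g0 :: gr).map (fun gr => pvScore pred gr)) (fun s => s)).getD 0)).getD 0 + 1) →
          x ∈ g0 :: gr := by
        intro x hx
        rcases List.mem_append.mp hx with hx | hx
        · exact List.mem_of_mem_take hx
        · exact List.mem_of_mem_drop hx
      refine ⟨?_, ?_, ?_⟩
      · intro pg hpg
        simp only [pvMatchGreedy] at hpg
        rcases List.mem_cons.mp hpg with h | h
        · rw [h]
          exact ⟨List.mem_cons_self, by
            rw [List.getD_eq_getElem _ _ hjlt]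
            exact List.getElem_mem hjlt⟩
        · obtain ⟨h1, h2⟩ := ihp pg h
          exact ⟨List.mem_cons_of_mem _ h1, hsub _ h2⟩
      · intro p hp
        simp only [pvMatchGreedy] at hp
        exact List.mem_cons_of_mem _ (ihl p hp)
      · intro g hg
        simp only [pvMatchGreedy] at hg
        exact hsub _ (ihg g hg)

-- ---- B's mask machinery, related to the reference matcher ----
def pvUnusedIdx (used : List Bool) (G : Nat) : List Nat :=
  (List.range G).filter (fun j => !(used.getD j false))
def pvGd (golds : List (List (Option String))) (j : Nat) : List (Option String) := golds.getD j []
def pvF (sp golds : List (List (Option String))) (ij : Nat × Nat) :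
    List (Option String) × List (Option String) := (sp.getD ij.1 [], golds.getD ij.2 [])

theorem pvGetD_map {α β : Type} (f : α → β) (l : List α) (i : Nat) (d : β) (d' : α)
    (h : i < l.length) : (l.map f).getD i d = f (l.getD i d') := by
  rw [List.getD_eq_getElem _ _ (by simpa using h), List.getD_eq_getElem _ _ h, List.getElem_map]

theorem pvGetD_set {α : Type} (l : List α) (i j : Nat) (a d : α) :
    (l.set i a).getD j d = if i = j ∧ i < l.length then a else l.getD j d := by
  rw [List.getD_eq_getElem?_getD, List.getElem?_set]
  by_cases h1 : i = j
  · subst h1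
    by_cases h2 : i < l.length
    · simp [h2]
    · simp [h2, List.getD_eq_getElem?_getD]
  · simp [h1, List.getD_eq_getElem?_getD]

theorem pvFoldl_filter {α β : Type} (f : β → α → β) (p : α → Bool)
    (hf : ∀ b x, p x = false → f b x = b) :
    ∀ (l : List α) (a : β), l.foldl f a = (l.filter p).foldl f a := by
  intro l
  induction l with
  | nil => intro a; rfl
  | cons x t ih =>
    intro a
    rw [List.foldl_cons, List.filter_cons]
    cases hx : p x
    · rw [hf a x hx, if_neg (by simp), ih]
    · rw [if_pos rfl, List.foldl_cons, ih]

theorem pvFirstMax_step {α : Type} (key : α → Int) (x y : α) (t : List α) :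
    pvFirstMax key x (y :: t) = pvFirstMax key (if key x < key y then y else x) t := by
  cases t with
  | nil => simp only [pvFirstMax]
  | cons z t' =>
    show (if key x < key (pvFirstMax key y (z :: t')) then pvFirstMax key y (z :: t') else x) = _
    have hy : pvFirstMax key y (z :: t') =
        if key y < key (pvFirstMax key z t') then pvFirstMax key z t' else y := rfl
    have hw : pvFirstMax key (if key x < key y then y else x) (z :: t') =
        if key (if key x < key y then y else x) < key (pvFirstMax key z t')
        then pvFirstMax key z t' else (if key x < key y then y else x) := rfl
    rw [hy, hw]
    by_cases h1 : key y < key (pvFirstMax key z t') <;> by_cases h2 : key x < key y <;>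
      simp only [h1, h2, if_true, if_false, reduceIte] <;> split_ifs <;>
      first | rfl | (exfalso; linarith)

theorem pvFoldBest (row : List Int) (used : List Bool) :
    ∀ (t : List Nat) (b : Nat), (∀ x ∈ t, used.getD x false = false) →
      t.foldl (fun (best : Int) j =>
          if used.getD j false = false ∧ (best < 0 ∨ row.getD best.toNat 0 < row.getD j 0)
          then (j : Int) else best) (b : Int)
        = ((pvFirstMax (fun j => row.getD j 0) b t : Nat) : Int) := by
  intro t
  induction t with
  | nil => intro b _; rfl
  | cons y t ih =>
    intro b hmem
    rw [List.foldl_cons]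
    have hy : used.getD y false = false := hmem y List.mem_cons_self
    have hcast : ((b : Int) < 0 ∨ row.getD (b : Int).toNat 0 < row.getD y 0) ↔
        (row.getD b 0 < row.getD y 0) := by
      constructor
      · rintro (h | h)
        · exact absurd h (by omega)
        · simpa using h
      · intro h; right; simpa using h
    have hone : (if used.getD y false = false ∧
          ((b : Int) < 0 ∨ row.getD (b : Int).toNat 0 < row.getD y 0)
        then (y : Int) else (b : Int)) =
        (((if row.getD b 0 < row.getD y 0 then y else b : Nat)) : Int) := by
      by_cases h : row.getD b 0 < row.getD y 0
      · rw [if_pos ⟨hy, hcast.mpr h⟩, if_pos h]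
      · rw [if_neg (by rw [hcast]; tauto), if_neg h]
    rw [hone, ih _ (fun x hx => hmem x (List.mem_cons_of_mem _ hx)), pvFirstMax_step]

theorem pvBestUnused_eq (row : List Int) (used : List Bool) (G : Nat)
    (u0 : Nat) (us' : List Nat) (hus : pvUnusedIdx used G = u0 :: us') :
    pvBestUnused row used G = ((pvFirstMax (fun j => row.getD j 0) u0 us' : Nat) : Int) := by
  have hmem : ∀ x ∈ pvUnusedIdx used G, used.getD x false = false := by
    intro x hx
    have := List.of_mem_filter hx
    simpa using this
  unfold pvBestUnused
  rw [pvFoldl_filter _ (fun j => !(used.getD j false))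
      (by
        intro b x hx
        have hx' : used.getD x false = true := by simpa using hx
        split_ifs with h
        · rw [hx'] at h
          exact absurd h.1 (by simp)
        · rfl)]
  show (pvUnusedIdx used G).foldl _ _ = _
  rw [hus, List.foldl_cons]
  have hu0 : used.getD u0 false = false := hmem u0 (hus ▸ List.mem_cons_self)
  rw [if_pos ⟨hu0, Or.inl (by norm_num)⟩]
  exact pvFoldBest row used us' u0 (fun x hx => hmem x (hus ▸ List.mem_cons_of_mem _ hx))

theorem pvFilter_ne_eraseIdx :
    ∀ (us : List Nat) (j R : Nat), us.Nodup → List.idxOf? j us = some R →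
      us.filter (fun x => !(x == j)) = us.eraseIdx R := by
  intro us
  induction us with
  | nil => intro j R _ h; simp [List.idxOf?] at h
  | cons y t ih =>
    intro j R hnd h
    rw [List.idxOf?_cons] at h
    by_cases hyj : (y == j) = true
    · rw [if_pos (by simpa using hyj)] at h
      have hR : R = 0 := by simpa using h.symm
      subst hR
      have hyj' : y = j := by simpa using hyj
      subst hyj'
      rw [List.filter_cons, if_neg (by simp), List.eraseIdx_cons_zero]
      apply List.filter_eq_self.mpr
      intro x hx
      have : x ≠ y := by
        intro hxy; subst hxy; exact (List.nodup_cons.mp hnd).1 hx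
      simpa using this
    · rw [if_neg (by simpa using hyj)] at h
      obtain ⟨R', hR', hRe⟩ := Option.map_eq_some_iff.mp h
      subst hRe
      rw [List.filter_cons, if_pos (by simpa using hyj), List.eraseIdx_cons_succ,
        ih j R' (List.nodup_cons.mp hnd).2 hR']

theorem pvUnusedIdx_nodup (used : List Bool) (G : Nat) : (pvUnusedIdx used G).Nodup :=
  (List.nodup_range).filter _

theorem pvUnusedIdx_lt (used : List Bool) (G : Nat) :
    ∀ j ∈ pvUnusedIdx used G, j < G ∧ used.getD j false = false := by
  intro j hj
  have h1 := List.mem_of_mem_filter hj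
  have h2 := List.of_mem_filter hj
  exact ⟨List.mem_range.mp h1, by simpa using h2⟩

-- the one-step correspondence: B's argmax-over-unused picks A's record, and marking it used
-- is A's take/drop deletion
theorem pvStep (golds0 : List (List (Option String))) (p : List (Option String))
    (used : List Bool) (hG : used.length = golds0.length)
    (u0 : Nat) (us' : List Nat) (hus : pvUnusedIdx used golds0.length = u0 :: us') :
    pvGd golds0 ((pvBestUnused (golds0.map (fun g => pvScore p g)) used golds0.length).toNat) =
      ((pvGd golds0 u0 :: us'.map (pvGd golds0)).getD
        ((PySem.List.index? ((pvGd golds0 u0 :: us'.map (pvGd golds0)).map (fun gr => pvScore p gr))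
          ((PySem.List.max? ((pvGd golds0 u0 :: us'.map (pvGd golds0)).map (fun gr => pvScore p gr)) (fun s => s)).getD 0)).getD 0) []) ∧
    (pvUnusedIdx (used.set ((pvBestUnused (golds0.map (fun g => pvScore p g)) used golds0.length).toNat) true) golds0.length).map (pvGd golds0) =
      (pvGd golds0 u0 :: us'.map (pvGd golds0)).take
        ((PySem.List.index? ((pvGd golds0 u0 :: us'.map (pvGd golds0)).map (fun gr => pvScore p gr))
          ((PySem.List.max? ((pvGd golds0 u0 :: us'.map (pvGd golds0)).map (fun gr => pvScore p gr)) (fun s => s)).getD 0)).getD 0) ++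
      (pvGd golds0 u0 :: us'.map (pvGd golds0)).drop
        ((PySem.List.index? ((pvGd golds0 u0 :: us'.map (pvGd golds0)).map (fun gr => pvScore p gr))
          ((PySem.List.max? ((pvGd golds0 u0 :: us'.map (pvGd golds0)).map (fun gr => pvScore p gr)) (fun s => s)).getD 0)).getD 0 + 1) ∧
    (pvUnusedIdx (used.set ((pvBestUnused (golds0.map (fun g => pvScore p g)) used golds0.length).toNat) true) golds0.length).length + 1 =
      (pvUnusedIdx used golds0.length).length := by
  have hlt := pvUnusedIdx_lt used golds0.length
  have hkj : ∀ x ∈ pvUnusedIdx used golds0.length,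
      (golds0.map (fun g => pvScore p g)).getD x 0 = pvScore p (pvGd golds0 x) := by
    intro x hx
    exact pvGetD_map _ golds0 x 0 [] (hlt x hx).1
  have hbest := pvBestUnused_eq (golds0.map (fun g => pvScore p g)) used golds0.length u0 us' hus
  have hjN : (pvBestUnused (golds0.map (fun g => pvScore p g)) used golds0.length).toNat =
      pvFirstMax (fun j => (golds0.map (fun g => pvScore p g)).getD j 0) u0 us' := by
    rw [hbest]; simp
  set kj := fun j => (golds0.map (fun g => pvScore p g)).getD j 0 with hkjdef
  set jst := pvFirstMax kj u0 us' with hjst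
  have hjmem : jst ∈ pvUnusedIdx used golds0.length := by
    rw [hus]; exact pvFirstMax_mem kj us' u0
  have hjG : jst < golds0.length := (hlt _ hjmem).1
  -- the score list of the remaining golds is the kj-image of the unused indices
  have hremmap : (pvGd golds0 u0 :: us'.map (pvGd golds0)).map (fun gr => pvScore p gr) =
      (u0 :: us').map kj := by
    rw [List.map_cons, List.map_map]
    have h1 : pvScore p (pvGd golds0 u0) = kj u0 :=
      (hkj u0 (hus ▸ List.mem_cons_self)).symm
    have h2 : us'.map ((fun gr => pvScore p gr) ∘ pvGd golds0) = us'.map kj := by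
      apply List.map_congr_left
      intro x hx
      exact (hkj x (hus ▸ List.mem_cons_of_mem _ hx)).symm
    rw [List.map_cons, h1, h2]
  have hmax : ((PySem.List.max? ((pvGd golds0 u0 :: us'.map (pvGd golds0)).map (fun gr => pvScore p gr)) (fun s => s)).getD 0) = kj jst := by
    rw [hremmap, List.map_cons, pvMax?_eq, Option.getD_some, pvFirstMax_map kj us' u0]
  -- the relative index both sides delete at
  have hidxeq := pvIdx_eq kj us' u0
  have hR : (PySem.List.index? ((pvGd golds0 u0 :: us'.map (pvGd golds0)).map (fun gr => pvScore p gr))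
      ((PySem.List.max? ((pvGd golds0 u0 :: us'.map (pvGd golds0)).map (fun gr => pvScore p gr)) (fun s => s)).getD 0)).getD 0 =
      (List.idxOf? jst (u0 :: us')).getD 0 := by
    rw [hmax, hremmap]
    simp only [PySem.List.index?]
    exact hidxeq.symm
  obtain ⟨Ridx, hRidx⟩ := Option.isSome_iff_exists.mp
    (List.isSome_idxOf?.mpr (hus ▸ hjmem))
  obtain ⟨hRlt, hRelem, -⟩ := List.idxOf?_eq_some_iff.mp hRidx
  have hRelem' : (u0 :: us')[Ridx] = jst := by simpa using hRelem
  have hR' : (PySem.List.index? ((pvGd golds0 u0 :: us'.map (pvGd golds0)).map (fun gr => pvScore p gr))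
      ((PySem.List.max? ((pvGd golds0 u0 :: us'.map (pvGd golds0)).map (fun gr => pvScore p gr)) (fun s => s)).getD 0)).getD 0 = Ridx := by
    rw [hR, hRidx, Option.getD_some]
  -- the new unused-index list is the old one with jst deleted at position Ridx
  have hUset : pvUnusedIdx (used.set jst true) golds0.length =
      (u0 :: us').eraseIdx Ridx := by
    have h1 : pvUnusedIdx (used.set jst true) golds0.length =
        (pvUnusedIdx used golds0.length).filter (fun x => !(x == jst)) := by
      unfold pvUnusedIdx
      rw [List.filter_filter]
      apply List.filter_congr
      intro j hj
      have hjlt : j < golds0.length := List.mem_range.mp hj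
      rw [pvGetD_set used jst j true false]
      by_cases he : jst = j
      · subst he
        rw [if_pos ⟨rfl, by omega⟩]
        simp
      · rw [if_neg (by tauto)]
        simp [Ne.symm he]
    rw [h1, hus]
    exact pvFilter_ne_eraseIdx (u0 :: us') jst Ridx (hus ▸ pvUnusedIdx_nodup used golds0.length) hRidx
  refine ⟨?_, ?_, ?_⟩
  · rw [hjN, hR', ← List.map_cons,
      pvGetD_map (pvGd golds0) (u0 :: us') Ridx [] 0 hRlt,
      List.getD_eq_getElem _ _ hRlt, hRelem']
  · rw [hjN, hUset, hR', ← List.map_cons, List.eraseIdx_eq_take_drop_succ,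
      List.map_append, List.map_take, List.map_drop]
  · rw [hjN, hUset, hus, List.length_eraseIdx]
    simp only [hRlt, if_pos]
    have : 0 < (u0 :: us').length := by simp
    omega

-- B's mask loop simulates the reference matcher
theorem pvSim (sp golds0 : List (List (Option String))) :
    ∀ (t s : Nat) (used : List Bool) (acc : List (Nat × Nat)),
      used.length = golds0.length →
      s + t ≤ sp.length →
      t ≤ (pvUnusedIdx used golds0.length).length →
      (t = sp.length - s ∨ t = (pvUnusedIdx used golds0.length).length) →
      (((List.range' s t).foldl (fun st i =>
          (st.1 ++ [(i, (pvBestUnused ((pvScoreMat sp golds0).getD i []) st.2 golds0.length).toNat)],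
           st.2.set (pvBestUnused ((pvScoreMat sp golds0).getD i []) st.2 golds0.length).toNat true))
        (acc, used)).1.map (pvF sp golds0)
        = acc.map (pvF sp golds0) ++
          (pvMatchGreedy (sp.drop s) ((pvUnusedIdx used golds0.length).map (pvGd golds0))).1) ∧
      sp.drop (s + t) = (pvMatchGreedy (sp.drop s) ((pvUnusedIdx used golds0.length).map (pvGd golds0))).2.1 ∧
      ((pvUnusedIdx ((List.range' s t).foldl (fun st i =>
          (st.1 ++ [(i, (pvBestUnused ((pvScoreMat sp golds0).getD i []) st.2 golds0.length).toNat)],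
           st.2.set (pvBestUnused ((pvScoreMat sp golds0).getD i []) st.2 golds0.length).toNat true))
        (acc, used)).2 golds0.length).map (pvGd golds0)
        = (pvMatchGreedy (sp.drop s) ((pvUnusedIdx used golds0.length).map (pvGd golds0))).2.2) ∧
      ((List.range' s t).foldl (fun st i =>
          (st.1 ++ [(i, (pvBestUnused ((pvScoreMat sp golds0).getD i []) st.2 golds0.length).toNat)],
           st.2.set (pvBestUnused ((pvScoreMat sp golds0).getD i []) st.2 golds0.length).toNat true))
        (acc, used)).2.length = golds0.length := by
  intro t
  induction t with
  | zero =>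
    intro s used acc hG hsp hle hmin
    simp only [List.range'_zero, List.foldl_nil, Nat.add_zero]
    rcases hmin with h | h
    · have hdrop : sp.drop s = [] := List.drop_eq_nil_of_le (by omega)
      rw [hdrop]
      exact ⟨by simp [pvMatchGreedy], by simp [pvMatchGreedy], by simp [pvMatchGreedy], hG⟩
    · have husnil : pvUnusedIdx used golds0.length = [] :=
        List.eq_nil_of_length_eq_zero h.symm
      have hmg : ∀ ps : List (List (Option String)),
          pvMatchGreedy ps [] = ([], ps, []) := by
        intro ps; cases ps <;> rfl
      rw [husnil, List.map_nil, hmg]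
      exact ⟨by simp, rfl, rfl, hG⟩
  | succ t ih =>
    intro s used acc hG hsp hle hmin
    obtain ⟨u0, us', hus⟩ : ∃ u0 us', pvUnusedIdx used golds0.length = u0 :: us' := by
      cases h : pvUnusedIdx used golds0.length with
      | nil => rw [h] at hle; simp at hle
      | cons a l => exact ⟨a, l, rfl⟩
    have hsS : s < sp.length := by omega
    have hrow : (pvScoreMat sp golds0).getD s [] =
        golds0.map (fun g => pvScore (sp.getD s []) g) := by
      unfold pvScoreMat
      exact pvGetD_map _ sp s [] [] hsS
    obtain ⟨ha, hb, hc⟩ := pvStep golds0 (sp.getD s []) used hG u0 us' hus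
    have hdropS : sp.drop s = sp.getD s [] :: sp.drop (s + 1) := by
      rw [List.getD_eq_getElem _ _ hsS]
      exact List.drop_eq_getElem_cons hsS
    have hremcons : (pvUnusedIdx used golds0.length).map (pvGd golds0) =
        pvGd golds0 u0 :: us'.map (pvGd golds0) := by
      rw [hus, List.map_cons]
    -- one loop step
    rw [List.range'_succ, List.foldl_cons]
    set j := (pvBestUnused ((pvScoreMat sp golds0).getD s []) used golds0.length).toNat with hjdef
    have hj' : j = (pvBestUnused (golds0.map (fun g => pvScore (sp.getD s []) g)) used golds0.length).toNat := by
      rw [hjdef, hrow]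
    have hG1 : (used.set j true).length = golds0.length := by
      rw [List.length_set]; exact hG
    have hlen1 : (pvUnusedIdx (used.set j true) golds0.length).length + 1 =
        (pvUnusedIdx used golds0.length).length := by rw [hj']; exact hc
    obtain ⟨ih1, ih2, ih3, ih4⟩ := ih (s + 1) (used.set j true) (acc ++ [(s, j)]) hG1
      (by omega) (by omega)
      (by
        rcases hmin with h | h
        · left; omega
        · right; omega)
    -- unfold one greedy step
    rw [hdropS, hremcons]
    simp only [pvMatchGreedy]
    rw [← hj'] at hb
    rw [hb] at ih1 ih2 ih3
    refine ⟨?_, ?_, ?_, ?_⟩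
    · rw [ih1, List.map_append]
      simp only [List.map_cons, List.map_nil, pvF]
      rw [List.append_assoc, List.singleton_append]
      rw [hj']
      congr 2
      rw [List.map_cons] at ha
      exact congrArg (fun x => (sp.getD s [], x)) ha
    · rw [show s + (t + 1) = (s + 1) + t by omega, ih2]
    · exact ih3
    · exact ih4

theorem pvRoleRowB_eq_roleRow (sp golds : List (List (Option String)))
    (mts : List (Nat × Nat)) (used : List Bool) (m G k : Nat) :
    pvRoleRowB sp golds mts used m G k =
      pvRoleRow (mts.map (pvF sp golds)) (sp.drop m)
        ((pvUnusedIdx used G).map (pvGd golds)) k := by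
  have hfn : pvColCount ((pvUnusedIdx used G).map (pvGd golds)) k =
      ((List.range G).countP (fun j =>
        !(used.getD j false) && ((golds.getD j []).getD k none).isSome) : Int) := by
    unfold pvColCount pvUnusedIdx pvGd
    rw [List.countP_map, List.countP_filter]
    congr 1
    apply List.countP_congr
    intro a _
    simp [Function.comp, Bool.and_comm]
  unfold pvRoleRowB pvRoleRow
  rw [List.foldl_map, hfn]
  simp only [pvF, pvColCount]
  rfl

theorem pvMapRangeGetD {α : Type} (l : List α) (d : α) :
    (List.range l.length).map (fun j => l.getD j d) = l := by
  apply List.ext_getElem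
  · simp
  · intro i h1 h2
    rw [List.getElem_map, List.getElem_range, List.getD_eq_getElem _ _ h2]

theorem pvMat_ext (R : List (List Int)) (nn : Nat) (f : Nat → List Int)
    (hR : R.length = nn) (h3 : pvRows3 R)
    (hcell : ∀ k < nn, f k = [pvCell R k 0, pvCell R k 1, pvCell R k 2]) :
    R = (List.range nn).map f := by
  apply List.ext_getElem
  · simp [hR]
  · intro i h1 h2
    rw [List.getElem_map, List.getElem_range]
    have hi : i < nn := by omega
    rw [hcell i hi]
    have hc : ∀ cc, pvCell R i cc = R[i].getD cc 0 := by
      intro cc; unfold pvCell; rw [List.getD_eq_getElem R [] h1]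
    rw [hc, hc, hc]
    have hrow : R[i].length = 3 := h3 _ (List.getElem_mem h1)
    rcases hl : R[i] with _ | ⟨a, _ | ⟨b, _ | ⟨cc, _ | t⟩⟩⟩ <;> rw [hl] at hrow <;> simp_all

theorem pvEvent_eq (p? g? : Option (List (List (Option String)))) (n : Int)
    (hp : ∀ r ∈ p?.getD [], (r.length : Int) = n)
    (hg : ∀ r ∈ g?.getD [], (r.length : Int) = n) :
    pvEventA p? g? n = pvEventB p? g? n := by
  have hlen0 : (List.replicate n.toNat ([0, 0, 0] : List Int)).length = n.toNat :=
    List.length_replicate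
  have hrows0 : pvRows3 (List.replicate n.toNat ([0, 0, 0] : List Int)) := by
    intro row hrow
    rw [List.eq_of_mem_replicate hrow]
    rfl
  cases p? with
  | none =>
    cases g? with
    | none =>
      simp only [pvEventA, pvEventB, List.map_replicate]
    | some golds =>
      have hgl : ∀ r ∈ golds, r.length = n.toNat := by
        intro r hr; have := hg r hr; omega
      have hBshape : pvEventB none (some golds) n =
          (List.range n.toNat).map (fun k => [0, 0, pvColCount golds k]) := by
        simp only [pvEventB, pvNonemptyCols, List.map_map]
        rfl
      simp only [pvEventA]
      rw [hBshape]
      apply pvMat_ext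
      · exact (pvPreserve _ (fun st r => pvCountRec_length st r 2)
          (fun st r h => pvCountRec_rows3 st r 2 h) golds _).1.trans hlen0
      · exact (pvPreserve _ (fun st r => pvCountRec_length st r 2)
          (fun st r h => pvCountRec_rows3 st r 2 h) golds _).2 hrows0
      · intro k hk
        have e : ∀ c, c < 3 →
            pvCell (golds.foldl (fun st gr => pvCountRec st gr 2)
              (List.replicate n.toNat [0, 0, 0])) k c =
            (if c = 2 then (golds.countP (fun r => (r.getD k none).isSome) : Int) else 0) := by
          intro c hc
          rw [pvCell_foldC n.toNat k c 2 hk hc (by omega) golds _ hrows0 hlen0 hgl,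
            pvCell_init, zero_add]
        rw [e 0 (by omega), e 1 (by omega), e 2 (by omega)]
        simp [pvColCount]
  | some preds =>
    cases g? with
    | none =>
      have hpl : ∀ r ∈ preds, r.length = n.toNat := by
        intro r hr; have := hp r hr; omega
      have hBshape : pvEventB (some preds) none n =
          (List.range n.toNat).map (fun k => [0, pvColCount preds k, 0]) := by
        simp only [pvEventB, pvNonemptyCols, List.map_map]
        rfl
      simp only [pvEventA]
      rw [hBshape]
      apply pvMat_ext
      · exact (pvPreserve _ (fun st r => pvCountRec_length st r 1)
          (fun st r h => pvCountRec_rows3 st r 1 h) preds _).1.trans hlen0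
      · exact (pvPreserve _ (fun st r => pvCountRec_length st r 1)
          (fun st r h => pvCountRec_rows3 st r 1 h) preds _).2 hrows0
      · intro k hk
        have e : ∀ c, c < 3 →
            pvCell (preds.foldl (fun st pr => pvCountRec st pr 1)
              (List.replicate n.toNat [0, 0, 0])) k c =
            (if c = 1 then (preds.countP (fun r => (r.getD k none).isSome) : Int) else 0) := by
          intro c hc
          rw [pvCell_foldC n.toNat k c 1 hk hc (by omega) preds _ hrows0 hlen0 hpl,
            pvCell_init, zero_add]
        rw [e 0 (by omega), e 1 (by omega), e 2 (by omega)]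
        simp [pvColCount]
    | some golds =>
      have hpl : ∀ r ∈ preds, r.length = n.toNat := by
        intro r hr; have := hp r hr; omega
      have hgl : ∀ r ∈ golds, r.length = n.toNat := by
        intro r hr; have := hg r hr; omega
      have hspl : ∀ r ∈ PySem.List.sorted preds (fun x => pvKey x) true, r.length = n.toNat := by
        intro r hr
        exact hpl r ((PySem.List.sorted_perm preds (fun x => pvKey x) true).mem_iff.mp hr)
      set sp := PySem.List.sorted preds (fun x => pvKey x) true with hspdef
      set G := golds.length with hGdef
      set m := min sp.length G with hmdef
      -- B's mask loop, as a range' fold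
      have hM : pvMatchMask (pvScoreMat sp golds) G m =
          (List.range' 0 m).foldl (fun st i =>
            (st.1 ++ [(i, (pvBestUnused ((pvScoreMat sp golds).getD i []) st.2 golds.length).toNat)],
             st.2.set (pvBestUnused ((pvScoreMat sp golds).getD i []) st.2 golds.length).toNat true))
            ([], List.replicate golds.length false) := by
        unfold pvMatchMask
        rw [List.range_eq_range']
      have hU0 : pvUnusedIdx (List.replicate G false) golds.length = List.range golds.length := by
        unfold pvUnusedIdx
        apply List.filter_eq_self.mpr
        intro j hj
        have hjG : j < golds.length := List.mem_range.mp hj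
        rw [List.getD_replicate _ (by omega : j < G)]
        rfl
      have hrem0 : (pvUnusedIdx (List.replicate G false) golds.length).map (pvGd golds) = golds := by
        rw [hU0]
        unfold pvGd
        exact pvMapRangeGetD golds []
      obtain ⟨hs1, hs2, hs3, hs4⟩ := pvSim sp golds m 0 (List.replicate G false) []
        (by rw [List.length_replicate])
        (by omega)
        (by rw [hU0, List.length_range]; omega)
        (by rw [hU0, List.length_range]; omega)
      rw [List.drop_zero, hrem0] at hs1 hs2 hs3
      rw [Nat.zero_add] at hs2
      rw [List.map_nil, List.nil_append] at hs1
      -- B's matched-branch value in reference form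
      have hB : pvEventB (some preds) (some golds) n =
          (List.range n.toNat).map (fun k =>
            pvRoleRow (pvMatchGreedy sp golds).1 (pvMatchGreedy sp golds).2.1
              (pvMatchGreedy sp golds).2.2 k) := by
        show (List.range n.toNat).map (fun k =>
            pvRoleRowB sp golds (pvMatchMask (pvScoreMat sp golds) G m).1
              (pvMatchMask (pvScoreMat sp golds) G m).2 m G k) = _
        apply List.map_congr_left
        intro k _
        rw [pvRoleRowB_eq_roleRow, hM, hs1, hs3, ← hs2]
      have hA : pvEventA (some preds) (some golds) n =
          (pvWhileA sp golds (List.replicate n.toNat [0, 0, 0])).2.1.foldl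
            (fun st gr => pvCountRec st gr 2)
            ((pvWhileA sp golds (List.replicate n.toNat [0, 0, 0])).1.foldl
              (fun st pr => pvCountRec st pr 1)
              (pvWhileA sp golds (List.replicate n.toNat [0, 0, 0])).2.2) := rfl
      rw [hA, hB, pvWhile_eq]
      dsimp only
      obtain ⟨hMGp, hMGl, hMGg⟩ := pvMG_mem sp golds
      set pairs := (pvMatchGreedy sp golds).1 with hpairsdef
      set lp := (pvMatchGreedy sp golds).2.1 with hlpdef
      set lg := (pvMatchGreedy sp golds).2.2 with hlgdef
      have hpairs : ∀ pg ∈ pairs, pg.1.length = n.toNat ∧ pg.2.length = n.toNat :=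
        fun pg hpg => ⟨hspl _ (hMGp pg hpg).1, hgl _ (hMGp pg hpg).2⟩
      have hlpl : ∀ r ∈ lp, r.length = n.toNat := fun r hr => hspl r (hMGl r hr)
      have hlgl : ∀ r ∈ lg, r.length = n.toNat := fun r hr => hgl r (hMGg r hr)
      have h1 := pvPreserve _ (fun st (pg : List (Option String) × List (Option String)) =>
          pvPairRec_length st pg.1 pg.2)
        (fun st pg h => pvPairRec_rows3 st pg.1 pg.2 h) pairs
        (List.replicate n.toNat [0, 0, 0])
      have h1len : (pairs.foldl (fun st pg => pvPairRec st pg.1 pg.2)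
          (List.replicate n.toNat [0, 0, 0])).length = n.toNat := h1.1.trans hlen0
      have h1rows : pvRows3 (pairs.foldl (fun st pg => pvPairRec st pg.1 pg.2)
          (List.replicate n.toNat [0, 0, 0])) := h1.2 hrows0
      have h2 := pvPreserve _ (fun st r => pvCountRec_length st r 1)
        (fun st r h => pvCountRec_rows3 st r 1 h) lp
        (pairs.foldl (fun st pg => pvPairRec st pg.1 pg.2) (List.replicate n.toNat [0, 0, 0]))
      have h2len : (lp.foldl (fun st pr => pvCountRec st pr 1)
          (pairs.foldl (fun st pg => pvPairRec st pg.1 pg.2)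
            (List.replicate n.toNat [0, 0, 0]))).length = n.toNat := h2.1.trans h1len
      have h2rows : pvRows3 (lp.foldl (fun st pr => pvCountRec st pr 1)
          (pairs.foldl (fun st pg => pvPairRec st pg.1 pg.2)
            (List.replicate n.toNat [0, 0, 0]))) := h2.2 h1rows
      have h3 := pvPreserve _ (fun st r => pvCountRec_length st r 2)
        (fun st r h => pvCountRec_rows3 st r 2 h) lg
        (lp.foldl (fun st pr => pvCountRec st pr 1)
          (pairs.foldl (fun st pg => pvPairRec st pg.1 pg.2) (List.replicate n.toNat [0, 0, 0])))
      apply pvMat_ext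
      · exact h3.1.trans h2len
      · exact h3.2 h2rows
      · intro k hk
        have e : ∀ c, c < 3 →
            pvCell (lg.foldl (fun st gr => pvCountRec st gr 2)
              (lp.foldl (fun st pr => pvCountRec st pr 1)
                (pairs.foldl (fun st pg => pvPairRec st pg.1 pg.2)
                  (List.replicate n.toNat [0, 0, 0])))) k c =
            (pairs.map (fun pg => pvComp c (pvDelta (pg.2.getD k none) (pg.1.getD k none)))).sum
              + (if c = 1 then (lp.countP (fun r => (r.getD k none).isSome) : Int) else 0)
              + (if c = 2 then (lg.countP (fun r => (r.getD k none).isSome) : Int) else 0) := by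
          intro c hc
          rw [pvCell_foldC n.toNat k c 2 hk hc (by omega) lg _ h2rows h2len hlgl,
            pvCell_foldC n.toNat k c 1 hk hc (by omega) lp _ h1rows h1len hlpl,
            pvCell_foldP n.toNat k c hk hc pairs _ hrows0 hlen0 hpairs,
            pvCell_init, zero_add]
        rw [pvRoleRow_eq, e 0 (by omega), e 1 (by omega), e 2 (by omega)]
        simp [pvColCount]

-- ===== VERDICT (by name: the statement is the Claim_ definition above) =====
theorem agg_ins_event_role_tpfpfn_stats_spec : Claim_equal_agg_ins_event_role_tpfpfn_stats := by
  intro pred gold erl _ hpre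
  obtain ⟨hlen, hle, hall⟩ := hpre
  unfold Spec_agg_ins_event_role_tpfpfn_stats
  unfold agg_ins_event_role_tpfpfn_stats agg_ins_event_role_tpfpfn_stats_alt
  rw [PySem.List.foldl_append_singleton_eq_map, List.nil_append]
  apply List.ext_getElem
  · simp [List.length_zip, hlen]
  · intro i h1 h2
    rw [List.getElem_map, List.getElem_map, List.getElem_zipIdx, List.getElem_range]
    have hzlen : i < (pred.zip gold).length := by simpa using h1
    have hip : i < pred.length := by rw [List.length_zip] at hzlen; omega
    have hig : i < gold.length := by rw [List.length_zip] at hzlen; omega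
    obtain ⟨hre1, hre2⟩ := hall i hip
    rw [List.getD_eq_getElem _ _ hip] at hre1
    rw [List.getD_eq_getElem _ _ hig] at hre2
    simp only [PySem.List.pyGetD_natCast, List.getElem_zip, Nat.zero_add]
    rw [List.getD_eq_getElem _ _ hip, List.getD_eq_getElem _ _ hig]
    exact pvEvent_eq _ _ _ hre1 hre2
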